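-- pv_equiv track=rewrite | github.com/cdjasonj/-NER_BILSTM_SELFATT_CRF | inputs/MSAR/data_process.py | get_trichar
-- ===== SOURCE A (Python) =====
-- def get_trichar(text):
--     """
--     w1,w2,w3,w4,w5,w6,w7
--     wpadw1w2 w1w2w3 w2w3w4 w4w5w6 w5w6w7 w6w7wpad
--     :param text:
--     :return:
--     """
--     new_text = []
--     for index, char in enumerate(text):
--         if len(text) == 1:
--             new_text.append('$$$')
--         elif index == 0: #[第一个]
--             new_text.append( '$'+char + text[index + 1])
--         elif index != len(text) - 1:  # 没有达到最后一个
--             new_text.append(text[index-1]+char + text[index + 1])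
--         else:
--             new_text.append(text[index-1] + char + '$')
--     return new_text
-- ===== SOURCE B (Python) =====
-- def get_trichar(text):
--     padded = '$' + text + '$'
--     return [padded[i:i + 3] for i in range(len(text))]
-- ===== Notes on version B (the rewrite author's own statement) =====
-- stated objective: simpler
-- what changed: B slides a fixed width-3 window over a '$'-padded copy of the text instead of branching on first/middle/last position inside an enumerate loop.
-- intended difference: On single-character texts other than '$', A returns ['$$$'] (dropping the character), while B returns ['$c$'], the padded trigram that A's own docstring describes; B's value is the intended one. — e.g. on get_trichar("a"): A returns ["$$$"], B returns ["$a$"]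
import Mathlib
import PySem

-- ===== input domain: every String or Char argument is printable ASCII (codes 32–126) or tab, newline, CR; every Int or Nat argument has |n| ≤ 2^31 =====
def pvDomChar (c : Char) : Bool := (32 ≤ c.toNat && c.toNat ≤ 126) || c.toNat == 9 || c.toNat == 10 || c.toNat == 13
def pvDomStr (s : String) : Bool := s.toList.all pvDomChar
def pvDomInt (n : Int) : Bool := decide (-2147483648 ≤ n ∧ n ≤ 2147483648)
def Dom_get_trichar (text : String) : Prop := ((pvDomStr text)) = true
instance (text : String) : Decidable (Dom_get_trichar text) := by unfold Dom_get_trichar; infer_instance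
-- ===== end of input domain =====

-- B slides a fixed width-3 window over a '$'-padded copy of the text instead of branching on
-- first/middle/last position inside an enumerate loop (objective: simpler); on single-character
-- texts A and B differ intentionally (see D_get_trichar below).

-- ===== PORT A =====
-- literal port of A: enumerate loop with position branches; text[index±1] is in range in every
-- reachable branch, so the unreachable none case of pyGet? takes an arbitrary default ' '
def get_trichar (text : String) : List String :=
  (PySem.List.enumerate text.toList).foldl (fun new_text p =>
    if text.toList.length = 1 then
      new_text ++ ["$$$"]
    else if p.1 = 0 then
      new_text ++ [String.ofList ['$', p.2, (PySem.Str.pyGet? text (p.1 + 1)).getD ' ']]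
    else if p.1 ≠ (text.toList.length : Int) - 1 then
      new_text ++ [String.ofList [(PySem.Str.pyGet? text (p.1 - 1)).getD ' ', p.2,
                                  (PySem.Str.pyGet? text (p.1 + 1)).getD ' ']]
    else
      new_text ++ [String.ofList [(PySem.Str.pyGet? text (p.1 - 1)).getD ' ', p.2, '$']]) []

-- ===== PORT B =====
def get_trichar_alt (text : String) : List String :=
  let padded : List Char := '$' :: text.toList ++ ['$']
  (PySem.List.pyRange 0 (text.toList.length : Int) 1).map
    (fun i => String.ofList (PySem.List.slice padded (some i) (some (i + 3))))

-- ===== PRECONDITION & SPEC =====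
-- On single-character texts other than "$", A returns ["$$$"] (dropping the character) while B
-- returns ["$c$"], the padded trigram A's own docstring describes; B's value is the intended one.
def D_get_trichar (text : String) : Prop := text.toList.length = 1 ∧ text ≠ "$"
instance (text : String) : Decidable (D_get_trichar text) := by unfold D_get_trichar; infer_instance
def Spec_get_trichar (text : String) (out : List String) : Prop := ¬ D_get_trichar text → out = get_trichar_alt text
instance (text : String) (out : List String) : Decidable (Spec_get_trichar text out) := by unfold Spec_get_trichar; infer_instance
def pvDiffWitness_get_trichar : String := "a"
def pvDiffWitnessOut_get_trichar : (List String) × (List String) := (["$$$"], ["$a$"])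

-- ===== CLAIM (what is proved, stated in full; the proofs are below) =====
def Claim_unchanged_get_trichar : Prop := ∀ (text : String), Dom_get_trichar text → Spec_get_trichar text (get_trichar text)
def Claim_changed_get_trichar : Prop := Dom_get_trichar (pvDiffWitness_get_trichar) ∧ D_get_trichar (pvDiffWitness_get_trichar) ∧ get_trichar (pvDiffWitness_get_trichar) = pvDiffWitnessOut_get_trichar.1 ∧ get_trichar_alt (pvDiffWitness_get_trichar) = pvDiffWitnessOut_get_trichar.2 ∧ pvDiffWitnessOut_get_trichar.1 ≠ pvDiffWitnessOut_get_trichar.2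
def Claim_exact_get_trichar : Prop := ∀ (text : String), Dom_get_trichar text → D_get_trichar text → get_trichar text ≠ get_trichar_alt text

-- ===== LEMMAS AND PROOFS =====

-- a width-3 take after a drop is the three elements at k, k+1, k+2
theorem take3_drop (l : List Char) (k : Nat) (h : k + 3 ≤ l.length) :
    (l.drop k).take 3 = [l[k]'(by omega), l[k+1]'(by omega), l[k+2]'(by omega)] := by
  induction k generalizing l with
  | zero =>
    match l, h with
    | a :: b :: c :: t, _ => simp
  | succ k ih =>
    match l, h with
    | a :: t, h =>
      simp only [List.drop_succ_cons, List.getElem_cons_succ]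
      exact ih t (by simpa using h)

-- the padded list read at i: '$' at the two pad positions, cs[i-1] inside
theorem padded_get (cs : List Char) (i : Nat) (h : i < cs.length + 2) :
    ('$' :: cs ++ ['$'])[i]'(by simp; omega) =
      (if i = 0 then '$' else cs.getD (i - 1) '$') := by
  match i with
  | 0 => simp
  | i + 1 =>
    rw [if_neg (Nat.succ_ne_zero i), Nat.add_sub_cancel]
    show (cs ++ ['$'])[i]'(by simp; omega) = cs.getD i '$'
    by_cases hi : i < cs.length
    · rw [List.getElem_append_left hi, List.getD_eq_getElem cs '$' hi]
    · have hcs : i = cs.length := by omega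
      subst hcs
      simp [List.getD]

theorem get_trichar_eq_alt (text : String) (hnD : ¬ D_get_trichar text) :
    get_trichar text = get_trichar_alt text := by
  by_cases hn1 : text.toList.length = 1
  · -- length-1 strings outside D_ : exactly text = "$"
    have ht : text = "$" := by
      by_contra hne
      exact hnD ⟨hn1, hne⟩
    subst ht
    decide
  · unfold get_trichar get_trichar_alt
    simp only [hn1, if_false]
    have hfe : (fun (new_text : List String) (p : Int × Char) =>
        if p.1 = 0 then
          new_text ++ [String.ofList ['$', p.2, (PySem.Str.pyGet? text (p.1 + 1)).getD ' ']]
        else if p.1 ≠ (text.toList.length : Int) - 1 then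
          new_text ++ [String.ofList [(PySem.Str.pyGet? text (p.1 - 1)).getD ' ', p.2,
                                      (PySem.Str.pyGet? text (p.1 + 1)).getD ' ']]
        else
          new_text ++ [String.ofList [(PySem.Str.pyGet? text (p.1 - 1)).getD ' ', p.2, '$']])
      = (fun new_text p => new_text ++ [
          if p.1 = 0 then String.ofList ['$', p.2, (PySem.Str.pyGet? text (p.1 + 1)).getD ' ']
          else if p.1 ≠ (text.toList.length : Int) - 1 then
            String.ofList [(PySem.Str.pyGet? text (p.1 - 1)).getD ' ', p.2,
                           (PySem.Str.pyGet? text (p.1 + 1)).getD ' ']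
          else String.ofList [(PySem.Str.pyGet? text (p.1 - 1)).getD ' ', p.2, '$']]) := by
      funext acc p; split_ifs <;> rfl
    rw [hfe, PySem.List.foldl_append_singleton_eq_map,
        PySem.List.enumerate_eq_map_pyRange (d := ' '), List.map_map]
    simp only [PySem.List.len_eq, List.nil_append]
    apply List.map_congr_left
    intro j hj
    rw [PySem.List.mem_pyRange_one] at hj
    obtain ⟨k, rfl⟩ : ∃ k : Nat, j = (k : Int) := ⟨j.toNat, by omega⟩
    have hk : k < text.toList.length := by exact_mod_cast hj.2
    have hn2 : 2 ≤ text.toList.length := by omega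
    simp only [Function.comp_apply]
    -- the width-3 window is the three padded characters at k, k+1, k+2
    have h1 : ((k : Int)).toNat = k := by omega
    have h2 : ((k : Int) + 3).toNat = k + 3 := by omega
    rw [PySem.List.slice_toNat _ (by omega) (by omega), h1, h2, Nat.add_sub_cancel_left,
        take3_drop ('$' :: text.toList ++ ['$']) k (by simp only [List.length_cons, List.length_append, List.length_nil]; omega),
        padded_get text.toList k (by omega), padded_get text.toList (k+1) (by omega),
        padded_get text.toList (k+2) (by omega),
        if_neg (by omega : ¬ k + 1 = 0), if_neg (by omega : ¬ k + 2 = 0),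
        Nat.add_sub_cancel, show k + 2 - 1 = k + 1 by omega,
        PySem.List.pyGetD_natCast]
    by_cases hk0 : k = 0
    · -- first position
      rw [if_pos (by omega : (k : Int) = 0), if_pos hk0,
          show (k : Int) + 1 = ((k + 1 : Nat) : Int) by omega, PySem.Str.pyGet?_natCast,
          List.getElem?_eq_getElem (by omega), List.getD_eq_getElem _ _ (by omega),
          List.getD_eq_getElem _ _ (by omega), List.getD_eq_getElem _ _ (by omega)]
      simp
    · by_cases hkl : k = text.toList.length - 1
      · -- last position
        rw [if_neg (by omega : ¬ (k : Int) = 0),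
            if_neg (by omega : ¬ (k : Int) ≠ (text.toList.length : Int) - 1), if_neg hk0,
            show (k : Int) - 1 = ((k - 1 : Nat) : Int) by omega, PySem.Str.pyGet?_natCast,
            List.getElem?_eq_getElem (by omega),
            List.getD_eq_getElem _ _ (by omega), List.getD_eq_getElem _ _ (by omega),
            List.getD_eq_getElem _ _ (by omega)]
        have hout : text.toList.getD (k + 1) '$' = '$' := by
          rw [List.getD_eq_getElem?_getD, List.getElem?_eq_none (by omega)]
          rfl
        rw [hout]
        simp
      · -- middle position
        rw [if_neg (by omega : ¬ (k : Int) = 0),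
            if_pos (by omega : (k : Int) ≠ (text.toList.length : Int) - 1), if_neg hk0,
            show (k : Int) - 1 = ((k - 1 : Nat) : Int) by omega,
            show (k : Int) + 1 = ((k + 1 : Nat) : Int) by omega,
            PySem.Str.pyGet?_natCast, PySem.Str.pyGet?_natCast,
            List.getElem?_eq_getElem (by omega), List.getElem?_eq_getElem (by omega),
            List.getD_eq_getElem _ _ (by omega), List.getD_eq_getElem _ _ (by omega),
            List.getD_eq_getElem _ _ (by omega)]
        simp [List.getElem?_eq_getElem (show k + 1 < text.toList.length by omega)]

-- ===== VERDICT (by name: the statement is the Claim_ definition above) =====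
theorem get_trichar_spec : Claim_unchanged_get_trichar := by
  intro text _ hnD
  exact get_trichar_eq_alt text hnD

theorem get_trichar_changed : Claim_changed_get_trichar := by
  unfold Claim_changed_get_trichar; decide

theorem get_trichar_tight : Claim_exact_get_trichar := by
  intro text _ hD heq
  obtain ⟨h1, hne⟩ := hD
  obtain ⟨c, hc⟩ : ∃ c, text.toList = [c] := by
    match h : text.toList, h1 with
    | [c], _ => exact ⟨c, rfl⟩
  have hcne : c ≠ '$' := by
    intro h
    apply hne
    have := congrArg String.ofList hc
    simpa [h] using this
  -- A gives ["$$$"], B gives ["$c$"] with c ≠ '$'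
  have hA : get_trichar text = ["$$$"] := by
    unfold get_trichar
    rw [hc]
    simp [PySem.List.enumerate]
  have hB : get_trichar_alt text = [String.ofList ['$', c, '$']] := by
    unfold get_trichar_alt
    rw [hc]
    rw [show ((([c] : List Char).length : Int)) = 1 by simp]
    rw [PySem.List.pyRange_one_cons (by norm_num), PySem.List.pyRange_one_eq_nil (by norm_num)]
    rw [List.map_cons, List.map_nil, PySem.List.slice_zero_start,
        PySem.List.slice_to _ (by norm_num : (0:Int) ≤ 0 + 3)]
    rfl
  rw [hA, hB] at heq
  have h3 : ("$$$" : String) = String.ofList ['$', c, '$'] := by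
    simpa using heq
  have h4 : ("$$$" : String).toList = ['$', c, '$'] := by
    rw [h3]; simp
  simp at h4
  exact hcne h4.symm
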